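-- pv_equiv track=rewrite | github.com/isakss/Forritun1_Python | document_retrieval.py | populate_word_dictionary
-- ===== SOURCE A (Python) =====
-- def populate_word_dictionary(list_object):
--     """Initializes a dictionary with the keys being words from a list of words,
--     and the values being the number of the documents in which that word occurs"""
--
--     new_dictionary = {}
--
--     for element in list_object:
--         for word in element:
--             if word not in new_dictionary:
--                 new_dictionary[word] = set()
--             else:
--                 pass
--
--     for word in new_dictionary:
--         for i in range(0,len(list_object)):
--             if word in list_object[i]:
--                 new_dictionary[word].add(i)
--
--     return new_dictionary
-- ===== SOURCE B (Python) =====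
-- def populate_word_dictionary(list_object):
--     """Single pass: enumerate docs, add each doc index to its words' sets."""
--     new_dictionary = {}
--     for i, element in enumerate(list_object):
--         for word in element:
--             new_dictionary.setdefault(word, set()).add(i)
--     return new_dictionary
-- ===== Notes on version B (the rewrite author's own statement) =====
-- stated objective: faster
-- what changed: Replaces A's two phases (collect keys, then for every word rescan every document with a membership test) by a single pass over enumerate(list_object) that setdefault-adds the document index to each word's set.
import Mathlib
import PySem

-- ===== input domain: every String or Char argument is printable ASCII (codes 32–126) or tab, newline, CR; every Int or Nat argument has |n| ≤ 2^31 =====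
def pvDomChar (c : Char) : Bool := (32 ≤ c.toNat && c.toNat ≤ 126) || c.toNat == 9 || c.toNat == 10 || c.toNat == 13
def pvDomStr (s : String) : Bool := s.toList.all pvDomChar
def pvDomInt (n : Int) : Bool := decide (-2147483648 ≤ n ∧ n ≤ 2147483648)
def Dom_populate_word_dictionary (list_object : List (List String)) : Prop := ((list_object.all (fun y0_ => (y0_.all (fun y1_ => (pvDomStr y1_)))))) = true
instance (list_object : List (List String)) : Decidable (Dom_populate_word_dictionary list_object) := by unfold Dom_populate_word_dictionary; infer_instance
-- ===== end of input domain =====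

-- B replaces A's two phases (collect keys, then rescan every document for every word)
-- by a single enumerate pass; measured asymptotically faster in a timing run.

-- ===== PORT A =====
-- phase 1: collect the words as keys mapped to empty sets, first-occurrence order
def pwd_phase1 (list_object : List (List String)) : PySem.Dict String (List Int) :=
  list_object.foldl (fun d element =>
    element.foldl (fun d word =>
      if d.contains word then d else d.insert word ([] : List Int)) d)
    PySem.Dict.empty

-- phase 2: for each key, scan all documents; new_dictionary[word].add(i) is
-- an in-place update of the stored set = Dict.modify with PySem.Set.add
def pwd_phase2 (list_object : List (List String)) (d1 : PySem.Dict String (List Int)) : PySem.Dict String (List Int) :=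
  d1.keys.foldl (fun d word =>
    (PySem.List.pyRange 0 (PySem.List.len list_object) 1).foldl (fun d i =>
      if word ∈ PySem.List.pyGetD list_object i [] then
        d.modify word [] (fun s => PySem.Set.add s i)
      else d) d) d1

def populate_word_dictionary (list_object : List (List String)) : List (String × List Int) :=
  (pwd_phase2 list_object (pwd_phase1 list_object)).items

-- ===== PORT B =====
-- new_dictionary.setdefault(word, set()).add(i) sets d[word] = d.get(word, set()) ∪ {i}
-- with the key appended when fresh = Dict.modify word [] (Set.add · i)
def populate_word_dictionary_alt (list_object : List (List String)) : List (String × List Int) :=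
  ((PySem.List.enumerate list_object 0).foldl (fun d p =>
      p.2.foldl (fun d word => d.modify word [] (fun s => PySem.Set.add s p.1)) d)
    PySem.Dict.empty).items

-- ===== PRECONDITION & SPEC =====
def Spec_populate_word_dictionary (list_object : List (List String)) (out : List (String × List Int)) : Prop := out = populate_word_dictionary_alt list_object
instance (list_object : List (List String)) (out : List (String × List Int)) : Decidable (Spec_populate_word_dictionary list_object out) := by unfold Spec_populate_word_dictionary; infer_instance

-- ===== CLAIM (what is proved, stated in full; the proofs are below) =====
def Claim_equal_populate_word_dictionary : Prop := ∀ (list_object : List (List String)), Dom_populate_word_dictionary list_object → Spec_populate_word_dictionary list_object (populate_word_dictionary list_object)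

-- ===== LEMMAS AND PROOFS =====

-- the index set a word ends up with, as both loops build it
def pwd_val (list_object : List (List String)) (w : String) (s : PySem.Set Int) : PySem.Set Int :=
  (PySem.List.enumerate list_object 0).foldl
    (fun s p => if w ∈ p.2 then PySem.Set.add s p.1 else s) s

-- ---- B side ----
lemma B_inner_getD (el : List String) (i : Int) (d : PySem.Dict String (List Int)) (w : String) :
    (el.foldl (fun d word => d.modify word [] (fun s => PySem.Set.add s i)) d).getD w []
      = if w ∈ el then PySem.Set.add (d.getD w []) i else d.getD w [] := by
  induction el generalizing d with
  | nil => simp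
  | cons x t ih =>
    simp only [List.foldl_cons, ih]
    by_cases hxw : x = w
    · subst hxw
      rw [PySem.Dict.getD_modify_self]
      by_cases hm : x ∈ t <;> simp [hm]
    · have hne : w ≠ x := fun h => hxw h.symm
      rw [PySem.Dict.getD_modify_of_ne _ _ _ hne]
      simp [List.mem_cons, hne]

lemma B_getD (l : List (Int × List String)) (d : PySem.Dict String (List Int)) (w : String) :
    (l.foldl (fun d p => p.2.foldl (fun d word => d.modify word [] (fun s => PySem.Set.add s p.1)) d) d).getD w []
      = l.foldl (fun s p => if w ∈ p.2 then PySem.Set.add s p.1 else s) (d.getD w []) := by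
  induction l generalizing d with
  | nil => rfl
  | cons p t ih => simp only [List.foldl_cons, ih, B_inner_getD]

lemma B_keys (l : List (Int × List String)) (d : PySem.Dict String (List Int)) :
    (l.foldl (fun d p => p.2.foldl (fun d word => d.modify word [] (fun s => PySem.Set.add s p.1)) d) d).keys
      = PySem.Set.update d.keys (l.flatMap (·.2)) := by
  induction l generalizing d with
  | nil => rfl
  | cons p t ih =>
    simp only [List.foldl_cons, ih, List.flatMap_cons]
    rw [PySem.Dict.keys_foldl_modify]
    simp [PySem.Set.update, List.foldl_append]

-- ---- A side, phase 1 ----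
lemma A1_inner_keys (el : List String) (d : PySem.Dict String (List Int)) :
    (el.foldl (fun d word => if d.contains word then d else d.insert word ([] : List Int)) d).keys
      = PySem.Set.update d.keys el := by
  induction el generalizing d with
  | nil => rfl
  | cons x t ih =>
    simp only [List.foldl_cons, ih]
    by_cases hc : d.contains x = true
    · have hx : x ∈ d.keys := (PySem.Dict.contains_iff_mem_keys d x).mp hc
      simp [hc, PySem.Set.update, PySem.Set.add_of_mem hx]
    · have hc' : d.contains x = false := by simpa using hc
      have hx : x ∉ d.keys := fun h =>
        absurd ((PySem.Dict.contains_iff_mem_keys d x).mpr h) hc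
      rw [hc']
      simp only [Bool.false_eq_true, if_false]
      rw [PySem.Dict.keys_insert_of_not_contains d _ hc']
      simp [PySem.Set.update, PySem.Set.add_of_not_mem hx]

lemma A1_keys (lo : List (List String)) (d : PySem.Dict String (List Int)) :
    (lo.foldl (fun d element =>
        element.foldl (fun d word => if d.contains word then d else d.insert word ([] : List Int)) d) d).keys
      = PySem.Set.update d.keys lo.flatten := by
  induction lo generalizing d with
  | nil => rfl
  | cons el t ih =>
    simp only [List.foldl_cons, ih, A1_inner_keys, List.flatten_cons]
    simp [PySem.Set.update, List.foldl_append]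

lemma A1_inner_getD (el : List String) (d : PySem.Dict String (List Int)) (w : String)
    (h : d.getD w [] = []) :
    (el.foldl (fun d word => if d.contains word then d else d.insert word ([] : List Int)) d).getD w [] = [] := by
  induction el generalizing d with
  | nil => simpa using h
  | cons x t ih =>
    simp only [List.foldl_cons]
    by_cases hc : d.contains x = true
    · simp only [hc, if_true]; exact ih d h
    · have hc' : d.contains x = false := by simpa using hc
      simp only [hc', Bool.false_eq_true, if_false]
      refine ih _ ?_
      rw [PySem.Dict.getD_insert]
      split_ifs with hwx
      · rfl
      · exact h

lemma A1_getD (lo : List (List String)) (d : PySem.Dict String (List Int)) (w : String)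
    (h : d.getD w [] = []) :
    (lo.foldl (fun d element =>
        element.foldl (fun d word => if d.contains word then d else d.insert word ([] : List Int)) d) d).getD w [] = [] := by
  induction lo generalizing d with
  | nil => simpa using h
  | cons el t ih => exact ih _ (A1_inner_getD el d w h)

-- ---- A side, phase 2 ----
lemma A2_getD_self (lo : List (List String)) (is : List Int) (d : PySem.Dict String (List Int)) (w : String) :
    (is.foldl (fun d i => if w ∈ PySem.List.pyGetD lo i [] then d.modify w [] (fun s => PySem.Set.add s i) else d) d).getD w []
      = is.foldl (fun s i => if w ∈ PySem.List.pyGetD lo i [] then PySem.Set.add s i else s) (d.getD w []) := by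
  induction is generalizing d with
  | nil => rfl
  | cons i t ih =>
    simp only [List.foldl_cons]
    by_cases hm : w ∈ PySem.List.pyGetD lo i ([] : List String)
    · simp [hm, ih, PySem.Dict.getD_modify_self]
    · simp [hm, ih]

lemma A2_getD_other (lo : List (List String)) (is : List Int) (d : PySem.Dict String (List Int))
    (w u : String) (h : w ≠ u) :
    (is.foldl (fun d i => if u ∈ PySem.List.pyGetD lo i [] then d.modify u [] (fun s => PySem.Set.add s i) else d) d).getD w []
      = d.getD w [] := by
  induction is generalizing d with
  | nil => rfl
  | cons i t ih =>
    simp only [List.foldl_cons]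
    by_cases hm : u ∈ PySem.List.pyGetD lo i ([] : List String)
    · simp only [hm, if_true, ih]
      exact PySem.Dict.getD_modify_of_ne _ _ _ h
    · simp [hm, ih]

lemma A2_keys (lo : List (List String)) (is : List Int) (d : PySem.Dict String (List Int))
    (u : String) (hu : u ∈ d.keys) :
    (is.foldl (fun d i => if u ∈ PySem.List.pyGetD lo i [] then d.modify u [] (fun s => PySem.Set.add s i) else d) d).keys
      = d.keys := by
  induction is generalizing d with
  | nil => rfl
  | cons i t ih =>
    simp only [List.foldl_cons]
    by_cases hm : u ∈ PySem.List.pyGetD lo i ([] : List String)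
    · simp only [hm, if_true]
      have hc : d.contains u = true := (PySem.Dict.contains_iff_mem_keys d u).mpr hu
      have hk : (d.modify u [] (fun s => PySem.Set.add s i)).keys = d.keys := by
        rw [PySem.Dict.keys_modify, PySem.Dict.keys_insert_of_contains d _ hc]
      rw [ih _ (by rw [hk]; exact hu), hk]
    · simp [hm, ih _ hu]

lemma A2_outer_keys (lo : List (List String)) (ks : List String) (d : PySem.Dict String (List Int))
    (h : ∀ u ∈ ks, u ∈ d.keys) :
    (ks.foldl (fun d word =>
        (PySem.List.pyRange 0 (PySem.List.len lo) 1).foldl (fun d i =>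
          if word ∈ PySem.List.pyGetD lo i [] then d.modify word [] (fun s => PySem.Set.add s i) else d) d) d).keys
      = d.keys := by
  induction ks generalizing d with
  | nil => rfl
  | cons u t ih =>
    have hu : u ∈ d.keys := h u (by simp)
    have hk := A2_keys lo (PySem.List.pyRange 0 (PySem.List.len lo) 1) d u hu
    simp only [List.foldl_cons]
    rw [ih _ (fun v hv => by rw [hk]; exact h v (by simp [hv]))]
    exact hk

lemma A2_outer_getD_other (lo : List (List String)) (ks : List String) (d : PySem.Dict String (List Int))
    (w : String) (hw : w ∉ ks) :
    (ks.foldl (fun d word =>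
        (PySem.List.pyRange 0 (PySem.List.len lo) 1).foldl (fun d i =>
          if word ∈ PySem.List.pyGetD lo i [] then d.modify word [] (fun s => PySem.Set.add s i) else d) d) d).getD w []
      = d.getD w [] := by
  induction ks generalizing d with
  | nil => rfl
  | cons u t ih =>
    have hwu : w ≠ u := fun h => hw (by simp [h])
    simp only [List.foldl_cons]
    rw [ih _ (fun h => hw (by simp [h])), A2_getD_other lo _ d w u hwu]

lemma A2_outer_getD_self (lo : List (List String)) (ks : List String) (d : PySem.Dict String (List Int))
    (w : String) (hw : w ∈ ks) (hnd : ks.Nodup) :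
    (ks.foldl (fun d word =>
        (PySem.List.pyRange 0 (PySem.List.len lo) 1).foldl (fun d i =>
          if word ∈ PySem.List.pyGetD lo i [] then d.modify word [] (fun s => PySem.Set.add s i) else d) d) d).getD w []
      = (PySem.List.pyRange 0 (PySem.List.len lo) 1).foldl
          (fun s i => if w ∈ PySem.List.pyGetD lo i [] then PySem.Set.add s i else s) (d.getD w []) := by
  induction ks generalizing d with
  | nil => simp at hw
  | cons u t ih =>
    simp only [List.foldl_cons]
    rcases List.mem_cons.mp hw with h | h
    · subst h
      have hnt : w ∉ t := (List.nodup_cons.mp hnd).1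
      rw [A2_outer_getD_other lo t _ w hnt, A2_getD_self]
    · have hwu : w ≠ u := fun he => (List.nodup_cons.mp hnd).1 (he ▸ h)
      rw [ih _ h (List.nodup_cons.mp hnd).2, A2_getD_other lo _ d w u hwu]

-- range fold = enumerate fold
lemma range_fold_eq_enum_fold (lo : List (List String)) (w : String) (s : PySem.Set Int) :
    (PySem.List.pyRange 0 (PySem.List.len lo) 1).foldl
        (fun s i => if w ∈ PySem.List.pyGetD lo i [] then PySem.Set.add s i else s) s
      = pwd_val lo w s := by
  unfold pwd_val
  rw [PySem.List.enumerate_eq_map_pyRange lo ([] : List String), List.foldl_map]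

lemma flatMap_snd_enumerate (lo : List (List String)) :
    ((PySem.List.enumerate lo 0).flatMap (·.2)) = lo.flatten := by
  rw [List.flatMap_def, PySem.List.map_snd_enumerate]

-- ===== VERDICT (by name: the statement is the Claim_ definition above) =====
theorem populate_word_dictionary_spec : Claim_equal_populate_word_dictionary := by
  intro lo _
  show (pwd_phase2 lo (pwd_phase1 lo)).items = populate_word_dictionary_alt lo
  unfold populate_word_dictionary_alt pwd_phase2 pwd_phase1
  set d1 := lo.foldl (fun d element =>
      element.foldl (fun d word => if d.contains word then d else d.insert word ([] : List Int)) d)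
    PySem.Dict.empty with hd1
  set dB := (PySem.List.enumerate lo 0).foldl (fun d p =>
      p.2.foldl (fun d word => d.modify word [] (fun s => PySem.Set.add s p.1)) d)
    PySem.Dict.empty with hdB
  have hk1 : d1.keys = PySem.Set.ofList lo.flatten := by
    rw [hd1, A1_keys]; rfl
  have hkB : dB.keys = PySem.Set.ofList lo.flatten := by
    rw [hdB, B_keys, flatMap_snd_enumerate]; rfl
  have hnd1 : d1.keys.Nodup := by rw [hk1]; exact PySem.Set.nodup_ofList _
  set dA := d1.keys.foldl (fun d word =>
      (PySem.List.pyRange 0 (PySem.List.len lo) 1).foldl (fun d i =>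
        if word ∈ PySem.List.pyGetD lo i [] then d.modify word [] (fun s => PySem.Set.add s i) else d) d)
    d1 with hdA
  have hkA : dA.keys = d1.keys := A2_outer_keys lo d1.keys d1 (fun _ h => h)
  have hndA : dA.keys.Nodup := by rw [hkA]; exact hnd1
  have hndB : dB.keys.Nodup := by rw [hkB]; exact PySem.Set.nodup_ofList _
  rw [PySem.Dict.items_eq_map_keys dA hndA ([] : List Int),
      PySem.Dict.items_eq_map_keys dB hndB ([] : List Int), hkA, hk1, hkB]
  refine List.map_congr_left (fun w hw => ?_)
  have hwk : w ∈ d1.keys := by rw [hk1]; exact hw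
  have hA : dA.getD w [] = pwd_val lo w [] := by
    rw [hdA, A2_outer_getD_self lo d1.keys d1 w hwk hnd1,
        A1_getD lo PySem.Dict.empty w (by simp), range_fold_eq_enum_fold]
  have hB : dB.getD w [] = pwd_val lo w [] := by
    rw [hdB, B_getD, PySem.Dict.getD_empty]; rfl
  rw [hA, hB]
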